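-- pv_equiv track=rewrite | github.com/WiktorB2004/Rozwiazania-Arkuszy-Maturalnych | 2023-przykladowa/Zadanie3.py | find_x_for_modulo
-- ===== SOURCE A (Python) =====
-- def find_x_for_modulo(data):
--     count = 0
--     for arr in data:
--         for x in range(0, arr[0] - 1):
--             d = pow(arr[1], x, arr[0])
--             if d == arr[2]:
--                 count += 1
--                 break
--     return count
-- ===== SOURCE B (Python) =====
-- def find_x_for_modulo(data):
--     count = 0
--     for arr in data:
--         m = arr[0]
--         if m <= 1:
--             continue
--         b, t = arr[1], arr[2]
--         d = 1
--         for _ in range(m - 1):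
--             if d == t:
--                 count += 1
--                 break
--             d = d * b % m
--     return count
-- ===== Notes on version B (the rewrite author's own statement) =====
-- stated objective: faster
-- what changed: Replaces the per-x modular exponentiation pow(arr[1], x, arr[0]) with a single running power d = d*base % m updated incrementally across the scan, skipping arrays with modulus <= 1 up front.
import Mathlib
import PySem

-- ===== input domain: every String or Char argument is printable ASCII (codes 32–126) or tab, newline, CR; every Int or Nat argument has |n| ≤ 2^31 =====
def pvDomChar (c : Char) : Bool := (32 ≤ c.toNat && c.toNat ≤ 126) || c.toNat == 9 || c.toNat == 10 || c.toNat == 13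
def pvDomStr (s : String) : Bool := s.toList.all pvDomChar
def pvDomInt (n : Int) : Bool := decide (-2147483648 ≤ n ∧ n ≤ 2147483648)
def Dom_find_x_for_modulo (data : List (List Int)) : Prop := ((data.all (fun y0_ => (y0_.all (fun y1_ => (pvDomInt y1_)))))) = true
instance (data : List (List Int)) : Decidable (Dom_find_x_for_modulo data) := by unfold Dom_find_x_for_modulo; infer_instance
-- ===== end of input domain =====

-- B replaces the per-x pow(arr[1], x, arr[0]) with one incrementally maintained running power; measured faster.

-- ===== PORT A =====
-- inner loop of A with break: scan the range list, recomputing pow(arr[1], x, arr[0]) at each x.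
-- x comes from range(0, arr[0]-1), hence x ≥ 0, so x.toNat is exact for Python's pow exponent.
def pvScanA (arr : List Int) : List Int → Bool
  | [] => false
  | x :: xs =>
    if PySem.Int.powMod (arr.getD 1 0) x.toNat (arr.getD 0 0) = arr.getD 2 0 then true
    else pvScanA arr xs

def find_x_for_modulo (data : List (List Int)) : Int :=
  data.foldl
    (fun count arr =>
      if pvScanA arr (PySem.List.pyRange 0 (arr.getD 0 0 - 1) 1) then count + 1 else count)
    0

-- ===== PORT B =====
-- inner loop of B: n remaining iterations, d the running power, updated d = d*b % m.
def pvScanB (b t m d : Int) : Nat → Bool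
  | 0 => false
  | n + 1 => if d = t then true else pvScanB b t m (PySem.Int.mod (d * b) m) n

def find_x_for_modulo_alt (data : List (List Int)) : Int :=
  data.foldl
    (fun count arr =>
      let m := arr.getD 0 0
      if m ≤ 1 then count
      else if pvScanB (arr.getD 1 0) (arr.getD 2 0) m 1 (m - 1).toNat then count + 1 else count)
    0

-- ===== PRECONDITION & SPEC =====
-- Python A raises IndexError on an empty row (arr[0]) and, when arr[0] ≥ 2, on a row shorter than 3 (arr[1]/arr[2]).
def Pre_find_x_for_modulo (data : List (List Int)) : Prop :=
  ∀ arr ∈ data, arr ≠ [] ∧ (2 ≤ arr.getD 0 0 → 3 ≤ arr.length)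
instance (data : List (List Int)) : Decidable (Pre_find_x_for_modulo data) := by
  unfold Pre_find_x_for_modulo; infer_instance

def pvWitness_find_x_for_modulo : List (List Int) := [[5, 2, 3], [1], [4, 3, 1, 9]]

def Spec_find_x_for_modulo (data : List (List Int)) (out : Int) : Prop := out = find_x_for_modulo_alt data
instance (data : List (List Int)) (out : Int) : Decidable (Spec_find_x_for_modulo data out) := by
  unfold Spec_find_x_for_modulo; infer_instance

-- ===== CLAIM (what is proved, stated in full; the proofs are below) =====
def Claim_equal_find_x_for_modulo : Prop := ∀ (data : List (List Int)), Dom_find_x_for_modulo data → Pre_find_x_for_modulo data → Spec_find_x_for_modulo data (find_x_for_modulo data)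

-- ===== LEMMAS AND PROOFS =====

-- the running power is in step: A's pow at exponent k equals B's state after k updates
theorem pvScan_eq (arr : List Int) (hm : 2 ≤ arr.getD 0 0) :
    ∀ (n k : Nat),
      pvScanA arr ((List.range n).map (fun (j : Nat) => ((k + j : Nat) : Int)))
        = pvScanB (arr.getD 1 0) (arr.getD 2 0) (arr.getD 0 0)
            (PySem.Int.mod ((arr.getD 1 0) ^ k) (arr.getD 0 0)) n := by
  intro n
  induction n with
  | zero => intro k; simp [pvScanA, pvScanB]
  | succ n ih =>
    intro k
    have hm0 : (0 : Int) < arr.getD 0 0 := by omega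
    have hlist : (List.range (n + 1)).map (fun (j : Nat) => ((k + j : Nat) : Int))
        = ((k + 0 : Nat) : Int) ::
          (List.range n).map (fun (j : Nat) => ((k + 1 + j : Nat) : Int)) := by
      rw [List.range_succ_eq_map, List.map_cons, List.map_map]
      congr 1
      apply List.map_congr_left
      intro j _
      simp only [Function.comp_apply]
      congr 1
      omega
    rw [hlist]
    show (if PySem.Int.powMod (arr.getD 1 0) ((k + 0 : Nat) : Int).toNat (arr.getD 0 0) = arr.getD 2 0
          then true
          else pvScanA arr ((List.range n).map (fun (j : Nat) => ((k + 1 + j : Nat) : Int))))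
        = pvScanB (arr.getD 1 0) (arr.getD 2 0) (arr.getD 0 0)
            (PySem.Int.mod ((arr.getD 1 0) ^ k) (arr.getD 0 0)) (n + 1)
    rw [Int.toNat_natCast, Nat.add_zero, PySem.Int.powMod_eq]
    show _ = (if PySem.Int.mod ((arr.getD 1 0) ^ k) (arr.getD 0 0) = arr.getD 2 0 then true
              else pvScanB (arr.getD 1 0) (arr.getD 2 0) (arr.getD 0 0)
                (PySem.Int.mod (PySem.Int.mod ((arr.getD 1 0) ^ k) (arr.getD 0 0) * arr.getD 1 0) (arr.getD 0 0)) n)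
    have hstep : PySem.Int.mod (PySem.Int.mod ((arr.getD 1 0) ^ k) (arr.getD 0 0) * arr.getD 1 0) (arr.getD 0 0)
        = PySem.Int.mod ((arr.getD 1 0) ^ (k + 1)) (arr.getD 0 0) := by
      rw [PySem.Int.mod_eq_emod_of_pos hm0, PySem.Int.mod_eq_emod_of_pos hm0,
        PySem.Int.mod_eq_emod_of_pos hm0, pow_succ, Int.mul_emod,
        Int.mul_emod ((arr.getD 1 0) ^ k) (arr.getD 1 0),
        Int.emod_emod_of_dvd _ (dvd_refl (arr.getD 0 0))]
    rw [hstep, ih (k + 1)]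

theorem pv_step_eq (count : Int) (arr : List Int) :
    (if pvScanA arr (PySem.List.pyRange 0 (arr.getD 0 0 - 1) 1) then count + 1 else count)
      = (let m := arr.getD 0 0
         if m ≤ 1 then count
         else if pvScanB (arr.getD 1 0) (arr.getD 2 0) m 1 (m - 1).toNat then count + 1 else count) := by
  show _ = (if arr.getD 0 0 ≤ 1 then count
            else if pvScanB (arr.getD 1 0) (arr.getD 2 0) (arr.getD 0 0) 1 (arr.getD 0 0 - 1).toNat
                 then count + 1 else count)
  by_cases hm : arr.getD 0 0 ≤ 1
  · rw [if_pos hm, PySem.List.pyRange_one_eq_nil (by omega)]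
    simp [pvScanA]
  · have hm2 : (2 : Int) ≤ arr.getD 0 0 := by omega
    have hr : PySem.List.pyRange 0 (arr.getD 0 0 - 1) 1
        = (List.range (arr.getD 0 0 - 1).toNat).map (fun (j : Nat) => ((0 + j : Nat) : Int)) := by
      rw [PySem.List.pyRange_one]
      simp
    have h0 : PySem.Int.mod ((arr.getD 1 0) ^ (0 : Nat)) (arr.getD 0 0) = 1 := by
      rw [PySem.Int.mod_eq_emod_of_pos (by omega), pow_zero, Int.emod_eq_of_lt (by omega) (by omega)]
    have hmain := pvScan_eq arr hm2 (arr.getD 0 0 - 1).toNat 0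
    rw [h0] at hmain
    rw [hr, hmain, if_neg hm]

theorem pv_funs_eq (data : List (List Int)) :
    find_x_for_modulo data = find_x_for_modulo_alt data := by
  unfold find_x_for_modulo find_x_for_modulo_alt
  congr 1
  funext count arr
  exact pv_step_eq count arr

-- ===== VERDICT (by name: the statement is the Claim_ definition above) =====
theorem find_x_for_modulo_spec : Claim_equal_find_x_for_modulo := by
  intro data _ _
  unfold Spec_find_x_for_modulo
  exact pv_funs_eq data
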